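-- pv_equiv track=rewrite | github.com/RaviSriTejaKuriseti/Seam-Carving | assignment.py | tracingpath
-- ===== SOURCE A (Python) =====
-- def tracingpath(energymatrix,image):
-- 	W=(len(energymatrix[0]))
-- 	H=(len(energymatrix))
-- 	a=min(energymatrix[H-1])
-- 	tracker=[[False for c in range(W)] for d in range(H)]
-- 	finl=[[0 for c in range(W)] for d in range(H)]
-- 	for J in range(0,W):
-- 		if(energymatrix[H-1][J]==a):
-- 			tracker[H-1][J]=True
--
-- 	for i in range(H-1,0,-1):
-- 		for j in range(0,W):
-- 			if(tracker[i][j]==True):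
-- 				if (j!=0) and (j!=W-1):
-- 					p=min(energymatrix[i-1][j-1],energymatrix[i-1][j],energymatrix[i-1][j+1])
-- 					if(p==energymatrix[i-1][j-1]):
-- 						tracker[i-1][j-1]=True
-- 					if(p==energymatrix[i-1][j]) :
-- 						tracker[i-1][j]=True
-- 					if(p==energymatrix[i-1][j+1]):
-- 						tracker[i-1][j+1]=True
-- 				elif(j==0):
-- 					p=min(energymatrix[i-1][j],energymatrix[i-1][j+1])
-- 					if(p==energymatrix[i-1][j]) :
-- 						tracker[i-1][j]=True
-- 					if(p==energymatrix[i-1][j+1]):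
-- 						tracker[i-1][j+1]=True
-- 				elif(j==W-1):
-- 					p=min(energymatrix[i-1][j-1],energymatrix[i-1][j])
-- 					if(p==energymatrix[i-1][j-1]):
-- 						tracker[i-1][j-1]=True
-- 					if(p==energymatrix[i-1][j]) :
-- 						tracker[i-1][j]=True                          #Marking the particular grids that should be whitened
--
-- 	for u in range(0,H):
-- 		for v in range(0,W):
-- 			if(tracker[u][v]):
-- 				finl[u][v]=255
-- 			else:
-- 				finl[u][v]=image[u][v]
-- 	return finl
-- ===== SOURCE B (Python) =====
-- def tracingpath(energymatrix, image):
--     H = len(energymatrix)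
--     W = len(energymatrix[0])
--     a = min(energymatrix[H - 1])
--     memo = {}
--
--     def marked(i, k):
--         # top-down memoized recursion: is cell (i, k) on a minimal seam?
--         # only columns j in {k-1, k, k+1} of the row below can mark column k
--         if (i, k) in memo:
--             return memo[(i, k)]
--         if i == H - 1:
--             r = energymatrix[i][k] == a
--         else:
--             row = energymatrix[i]
--             r = False
--             for j in range(max(0, k - 1), min(W, k + 2)):
--                 if marked(i + 1, j) and row[k] == min(row[max(0, j - 1):min(W, j + 2)]):
--                     r = True
--         memo[(i, k)] = r
--         return r
--
--     return [[255 if marked(u, v) else image[u][v] for v in range(W)]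
--             for u in range(H)]
-- ===== Notes on version B (the rewrite author's own statement) =====
-- stated objective: alternative
-- what changed: B replaces A's bottom-up sweep that mutates an H×W boolean tracker matrix row by row with a top-down memoized recursion marked(i,k) (demand-driven, keyed by cell in a dict) queried independently for each output cell; each cell asks only its three lower neighbours and uses one clamped-window min test instead of A's three boundary branches.
import Mathlib
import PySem

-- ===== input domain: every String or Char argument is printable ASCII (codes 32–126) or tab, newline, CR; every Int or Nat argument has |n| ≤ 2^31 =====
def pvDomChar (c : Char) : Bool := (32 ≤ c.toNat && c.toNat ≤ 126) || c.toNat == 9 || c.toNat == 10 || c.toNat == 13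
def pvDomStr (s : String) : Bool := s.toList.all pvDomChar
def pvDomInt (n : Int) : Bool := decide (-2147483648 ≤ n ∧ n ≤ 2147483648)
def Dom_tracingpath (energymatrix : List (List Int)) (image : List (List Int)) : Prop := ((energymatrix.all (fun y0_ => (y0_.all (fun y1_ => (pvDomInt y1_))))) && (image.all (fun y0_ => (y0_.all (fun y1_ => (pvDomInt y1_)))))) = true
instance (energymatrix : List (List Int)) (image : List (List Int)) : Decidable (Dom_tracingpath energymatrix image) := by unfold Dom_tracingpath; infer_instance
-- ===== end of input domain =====

-- B replaces A's bottom-up tracker-matrix sweep with a top-down memoized per-cell recursion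
-- marked(i,k) over a memo dict, queried per output cell (objective: alternative).


-- ===== PORT A =====
def pvAGet (m : List (List Int)) (i j : Int) : Int :=
  PySem.List.pyGetD (PySem.List.pyGetD m i []) j 0
def pvAGetB (t : List (List Bool)) (i j : Int) : Bool :=
  PySem.List.pyGetD (PySem.List.pyGetD t i []) j false
def pvASet {α : Type} (m : List (List α)) (i j : Int) (v : α) : List (List α) :=
  PySem.List.pySetD m i (PySem.List.pySetD (PySem.List.pyGetD m i []) j v)

def pvABranch (energymatrix : List (List Int)) (W i : Int) (tr : List (List Bool)) (j : Int) : List (List Bool) :=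
  if pvAGetB tr i j == true then
    if j != 0 && j != W - 1 then
      let p := min (pvAGet energymatrix (i-1) (j-1)) (min (pvAGet energymatrix (i-1) j) (pvAGet energymatrix (i-1) (j+1)))
      let tr := if p == pvAGet energymatrix (i-1) (j-1) then pvASet tr (i-1) (j-1) true else tr
      let tr := if p == pvAGet energymatrix (i-1) j then pvASet tr (i-1) j true else tr
      if p == pvAGet energymatrix (i-1) (j+1) then pvASet tr (i-1) (j+1) true else tr
    else if j == 0 then
      let p := min (pvAGet energymatrix (i-1) j) (pvAGet energymatrix (i-1) (j+1))
      let tr := if p == pvAGet energymatrix (i-1) j then pvASet tr (i-1) j true else tr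
      if p == pvAGet energymatrix (i-1) (j+1) then pvASet tr (i-1) (j+1) true else tr
    else if j == W - 1 then
      let p := min (pvAGet energymatrix (i-1) (j-1)) (pvAGet energymatrix (i-1) j)
      let tr := if p == pvAGet energymatrix (i-1) (j-1) then pvASet tr (i-1) (j-1) true else tr
      if p == pvAGet energymatrix (i-1) j then pvASet tr (i-1) j true else tr
    else tr
  else tr

def pvABottomStep (energymatrix : List (List Int)) (H a : Int) (tr : List (List Bool)) (J : Int) : List (List Bool) :=
  if pvAGet energymatrix (H-1) J == a then pvASet tr (H-1) J true else tr

def pvAFillStep (tracker : List (List Bool)) (image : List (List Int)) (W : Int) (f : List (List Int)) (u : Int) : List (List Int) :=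
  (PySem.List.pyRange 0 W 1).foldl (fun f v =>
    if pvAGetB tracker u v then pvASet f u v 255 else pvASet f u v (pvAGet image u v)) f

def tracingpath (energymatrix : List (List Int)) (image : List (List Int)) : List (List Int) :=
  let W : Int := (PySem.List.pyGetD energymatrix 0 []).length
  let H : Int := energymatrix.length
  let a : Int := (PySem.List.min? (PySem.List.pyGetD energymatrix (H-1) []) (fun x => x)).getD 0
  let tracker : List (List Bool) :=
    (PySem.List.pyRange 0 H 1).map (fun _ => (PySem.List.pyRange 0 W 1).map (fun _ => false))
  let finl : List (List Int) :=
    (PySem.List.pyRange 0 H 1).map (fun _ => (PySem.List.pyRange 0 W 1).map (fun _ => (0:Int)))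
  let tracker := (PySem.List.pyRange 0 W 1).foldl (pvABottomStep energymatrix H a) tracker
  let tracker := (PySem.List.pyRange (H-1) 0 (-1)).foldl (fun tr i =>
    (PySem.List.pyRange 0 W 1).foldl (pvABranch energymatrix W i) tr) tracker
  let finl := (PySem.List.pyRange 0 H 1).foldl (pvAFillStep tracker image W) finl
  finl

-- ===== PORT B =====
-- marked(i, k) is ported with the change of variable d = H-1-i (the recursion depth), exact for
-- every call the program makes; the memo dict keeps Python's (i, k) keys.
def pvBUpd (row : List Int) (W k : Int) (res : Bool × PySem.Dict (Int × Int) Bool)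
    (r : Bool) (j : Int) : PySem.Dict (Int × Int) Bool × Bool :=
  if res.1 && (PySem.List.pyGetD row k 0 ==
      (PySem.List.min? (PySem.List.slice row (some (max 0 (j - 1))) (some (min W (j + 2)))) (fun x => x)).getD 0)
  then (res.2, true) else (res.2, r)

def pvBMarked (em : List (List Int)) (H W a : Int) :
    Nat → Int → PySem.Dict (Int × Int) Bool → Bool × PySem.Dict (Int × Int) Bool
  | 0, k, memo =>
    match memo.get? (H - 1, k) with
    | some b => (b, memo)
    | none =>
        let r := PySem.List.pyGetD (PySem.List.pyGetD em (H - 1) []) k 0 == a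
        (r, memo.insert (H - 1, k) r)
  | d+1, k, memo =>
    let i : Int := H - 1 - ((d : Int) + 1)
    match memo.get? (i, k) with
    | some b => (b, memo)
    | none =>
        let row := PySem.List.pyGetD em i []
        let st := (PySem.List.pyRange (max 0 (k - 1)) (min W (k + 2)) 1).foldl
          (fun st j => pvBUpd row W k (pvBMarked em H W a d j st.1) st.2 j) (memo, false)
        (st.2, st.1.insert (i, k) st.2)

def pvBFillRowStep (em image : List (List Int)) (H W a : Int) (u : Int)
    (rs : List Int × PySem.Dict (Int × Int) Bool) (v : Int) :
    List Int × PySem.Dict (Int × Int) Bool :=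
  let res := pvBMarked em H W a (H - 1 - u).toNat v rs.2
  (rs.1 ++ [if res.1 then (255 : Int) else PySem.List.pyGetD (PySem.List.pyGetD image u []) v 0], res.2)

def pvBFillStep (em image : List (List Int)) (H W a : Int)
    (st : List (List Int) × PySem.Dict (Int × Int) Bool) (u : Int) :
    List (List Int) × PySem.Dict (Int × Int) Bool :=
  let rs := (PySem.List.pyRange 0 W 1).foldl (pvBFillRowStep em image H W a u) ([], st.2)
  (st.1 ++ [rs.1], rs.2)

def tracingpath_alt (energymatrix : List (List Int)) (image : List (List Int)) : List (List Int) :=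
  let H : Int := energymatrix.length
  let W : Int := (PySem.List.pyGetD energymatrix 0 []).length
  let a : Int := (PySem.List.min? (PySem.List.pyGetD energymatrix (H-1) []) (fun x => x)).getD 0
  ((PySem.List.pyRange 0 H 1).foldl (pvBFillStep energymatrix image H W a)
    ([], PySem.Dict.empty)).1

-- ===== PRECONDITION & SPEC =====
-- Pre_ excludes inputs on which A raises (empty matrix, zero width, W = 1 with H ≥ 2, an energy or
-- image row shorter than needed); it also excludes ragged energy matrices containing a row shorter
-- than W on which A happens to return because the marks avoid the short row — that in-range pattern
-- is an accident of where the seam lands, not expressible in closed form.  (On one-column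
-- matrices with two or more rows A raises IndexError — its j == 0 branch reads
-- energymatrix[i-1][1]; those inputs are among the excluded ones.)
def Pre_tracingpath (energymatrix : List (List Int)) (image : List (List Int)) : Prop :=
  energymatrix ≠ [] ∧
  1 ≤ (energymatrix.headI).length ∧
  (energymatrix.length = 1 ∨ 2 ≤ (energymatrix.headI).length) ∧
  (∀ r ∈ energymatrix, (energymatrix.headI).length ≤ r.length) ∧
  energymatrix.length ≤ image.length ∧
  (∀ r ∈ image.take energymatrix.length, (energymatrix.headI).length ≤ r.length)
instance (energymatrix : List (List Int)) (image : List (List Int)) : Decidable (Pre_tracingpath energymatrix image) := by unfold Pre_tracingpath; infer_instance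

def pvWitness_tracingpath : List (List Int) × List (List Int) :=
  ([[3, 1, 2], [2, 2, 9]], [[10, 20, 30], [40, 50, 60]])

def Spec_tracingpath (energymatrix : List (List Int)) (image : List (List Int)) (out : List (List Int)) : Prop := out = tracingpath_alt energymatrix image
instance (energymatrix : List (List Int)) (image : List (List Int)) (out : List (List Int)) : Decidable (Spec_tracingpath energymatrix image out) := by unfold Spec_tracingpath; infer_instance

-- ===== CLAIM (what is proved, stated in full; the proofs are below) =====
def Claim_equal_tracingpath : Prop := ∀ (energymatrix : List (List Int)) (image : List (List Int)), Dom_tracingpath energymatrix image → Pre_tracingpath energymatrix image → Spec_tracingpath energymatrix image (tracingpath energymatrix image)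


-- ===== LEMMAS AND PROOFS =====

-- minimum of the window upper[lo:hi] (0 if empty), and the markedness of column k
-- produced by a marked column j one row below (k in the clamped window, with minimal energy)
def pvMinSeg (upper : List Int) (lo hi : Nat) : Int :=
  match (upper.drop lo).take (hi - lo) with
  | [] => 0
  | x :: t => t.foldl min x

def pvMark (upper : List Int) (W j k : Nat) : Bool :=
  decide (j - 1 ≤ k) && decide (k < min W (j + 2)) &&
  (upper.getD k 0 == pvMinSeg upper (j - 1) (min W (j + 2)))

-- the canonical marked predicate, by distance d from the bottom row (row index = H-1-d)
def pvSpecRow (em : List (List Int)) (W : Nat) (a : Int) : Nat → Nat → Bool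
  | 0, k => (em.getD (em.length - 1) []).getD k 0 == a
  | d+1, k => (List.range W).any (fun j =>
      pvSpecRow em W a d j && pvMark (em.getD (em.length - 1 - (d+1)) []) W j k)

def pvShape {α : Type} (t : List (List α)) (Hn Wn : Nat) : Prop :=
  t.length = Hn ∧ ∀ u, u < Hn → (t.getD u []).length = Wn

-- ---- generic nested get/set facts ----

lemma pvGet2_set2 {α : Type} (t : List (List α)) (i j u k : Nat) (x d : α)
    (hi : i < t.length) (hj : j < (t.getD i []).length) :
    ((t.set i ((t.getD i []).set j x)).getD u []).getD k d
      = if u = i ∧ k = j then x else (t.getD u []).getD k d := by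
  by_cases hu : u = i
  · subst hu
    have h1 : (t.set u ((t.getD u []).set j x)).getD u [] = (t.getD u []).set j x := by
      simp [List.getD_eq_getElem?_getD, List.getElem?_set, hi]
    rw [h1]
    by_cases hk : k = j
    · subst hk
      have hj' : k < (t[u]?.getD []).length := by
        simpa [List.getD_eq_getElem?_getD] using hj
      simp [List.getD_eq_getElem?_getD, List.getElem?_set_self, hj']
    · simp [List.getD_eq_getElem?_getD, List.getElem?_set, Ne.symm hk, hk]
  · have h1 : (t.set i ((t.getD i []).set j x)).getD u [] = t.getD u [] := by
      simp [List.getD_eq_getElem?_getD, List.getElem?_set, Ne.symm hu]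
    rw [h1]; simp [hu]

lemma pvShape_set2 {α : Type} (t : List (List α)) (Hn Wn i j : Nat) (x : α)
    (h : pvShape t Hn Wn) (hi : i < Hn) (hj : j < Wn) :
    pvShape (t.set i ((t.getD i []).set j x)) Hn Wn := by
  obtain ⟨h1, h2⟩ := h
  refine ⟨by simp [h1], fun u hu => ?_⟩
  by_cases hu' : u = i
  · subst hu'
    have : (t.set u ((t.getD u []).set j x)).getD u [] = (t.getD u []).set j x := by
      simp [List.getD_eq_getElem?_getD, List.getElem?_set, h1 ▸ hi]
    rw [this, List.length_set]; exact h2 u hu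
  · have : (t.set i ((t.getD i []).set j x)).getD u [] = t.getD u [] := by
      simp [List.getD_eq_getElem?_getD, List.getElem?_set, Ne.symm hu']
    rw [this]; exact h2 u hu

lemma pvASet_natCast {α : Type} (t : List (List α)) (i j : Nat) (x : α) :
    pvASet t (i : Int) (j : Int) x = t.set i ((t.getD i []).set j x) := by
  simp [pvASet]

lemma pvAGetB_natCast (t : List (List Bool)) (u k : Nat) :
    pvAGetB t (u : Int) (k : Int) = (t.getD u []).getD k false := by
  simp [pvAGetB]

lemma pvAGet_natCast (m : List (List Int)) (u k : Nat) :
    pvAGet m (u : Int) (k : Int) = (m.getD u []).getD k 0 := by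
  simp [pvAGet]

-- ---- window extraction ----

lemma pvTake2 {α : Type} [Inhabited α] (l : List α) (n : Nat) (h : n + 1 < l.length) :
    (l.drop n).take 2 = [l.getD n default, l.getD (n+1) default] := by
  have h0 : n < l.length := by omega
  rw [List.drop_eq_getElem_cons h0, List.drop_eq_getElem_cons h]
  simp only [List.take_succ_cons, List.take_zero]
  simp [List.getD_eq_getElem?_getD, List.getElem?_eq_getElem, h, h0]

lemma pvTake3 {α : Type} [Inhabited α] (l : List α) (n : Nat) (h : n + 2 < l.length) :
    (l.drop n).take 3 = [l.getD n default, l.getD (n+1) default, l.getD (n+2) default] := by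
  have h0 : n < l.length := by omega
  have h1 : n + 1 < l.length := by omega
  rw [List.drop_eq_getElem_cons h0, List.drop_eq_getElem_cons h1, List.drop_eq_getElem_cons h]
  simp only [List.take_succ_cons, List.take_zero]
  simp [List.getD_eq_getElem?_getD, List.getElem?_eq_getElem, h, h0, h1]

-- ---- A side: the branch body marks exactly the window-minimal cells ----

-- effect of one conditional mark on one cell
lemma pvCondSet_get (tr : List (List Bool)) (Hn Wn i' k' u k : Nat) (c : Bool)
    (hsh : pvShape tr Hn Wn) (hi : i' < Hn) (hk' : k' < Wn) (hu : u < Hn) (hk : k < Wn) :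
    (((if c then tr.set i' ((tr.getD i' []).set k' true) else tr).getD u []).getD k false)
      = ((tr.getD u []).getD k false || (c && decide (u = i') && decide (k = k'))) := by
  cases c with
  | false => simp
  | true =>
    rw [if_pos (by trivial)]
    rw [pvGet2_set2 tr i' k' u k true false (by rw [hsh.1]; omega) (by rw [hsh.2 i' hi]; omega)]
    by_cases h1 : u = i' <;> by_cases h2 : k = k' <;> simp [h1, h2]

lemma pvCondSet_shape (tr : List (List Bool)) (Hn Wn i' k' : Nat) (c : Bool)
    (hsh : pvShape tr Hn Wn) (hi : i' < Hn) (hk' : k' < Wn) :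
    pvShape (if c then tr.set i' ((tr.getD i' []).set k' true) else tr) Hn Wn := by
  cases c with
  | false => simpa using hsh
  | true => simpa using pvShape_set2 tr Hn Wn i' k' true hsh hi hk'

lemma pvChain2_get (tr : List (List Bool)) (Hn Wn i' a b u k : Nat) (ca cb : Bool)
    (hsh : pvShape tr Hn Wn) (hi : i' < Hn) (ha : a < Wn) (hb : b < Wn) (hu : u < Hn) (hk : k < Wn) :
    ((((if cb then
          (if ca then tr.set i' ((tr.getD i' []).set a true) else tr).set i'
            (((if ca then tr.set i' ((tr.getD i' []).set a true) else tr).getD i' []).set b true)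
        else (if ca then tr.set i' ((tr.getD i' []).set a true) else tr))).getD u []).getD k false)
      = ((tr.getD u []).getD k false
          || (decide (u = i') && (ca && decide (k = a) || cb && decide (k = b)))) := by
  have s1 := pvCondSet_shape tr Hn Wn i' a ca hsh hi ha
  rw [pvCondSet_get _ Hn Wn i' b u k cb s1 hi hb hu hk,
      pvCondSet_get tr Hn Wn i' a u k ca hsh hi ha hu hk]
  by_cases h1 : u = i' <;> simp [h1, Bool.or_assoc, Bool.and_or_distrib_left]

lemma pvChain2_shape (tr : List (List Bool)) (Hn Wn i' a b : Nat) (ca cb : Bool)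
    (hsh : pvShape tr Hn Wn) (hi : i' < Hn) (ha : a < Wn) (hb : b < Wn) :
    pvShape (if cb then
          (if ca then tr.set i' ((tr.getD i' []).set a true) else tr).set i'
            (((if ca then tr.set i' ((tr.getD i' []).set a true) else tr).getD i' []).set b true)
        else (if ca then tr.set i' ((tr.getD i' []).set a true) else tr)) Hn Wn :=
  pvCondSet_shape _ Hn Wn i' b cb (pvCondSet_shape tr Hn Wn i' a ca hsh hi ha) hi hb

lemma pvChain3_get (tr : List (List Bool)) (Hn Wn i' a b c u k : Nat) (ca cb cc : Bool)
    (hsh : pvShape tr Hn Wn) (hi : i' < Hn) (ha : a < Wn) (hb : b < Wn) (hc : c < Wn)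
    (hu : u < Hn) (hk : k < Wn) :
    (((if cc then
          (if cb then
            (if ca then tr.set i' ((tr.getD i' []).set a true) else tr).set i'
              (((if ca then tr.set i' ((tr.getD i' []).set a true) else tr).getD i' []).set b true)
          else (if ca then tr.set i' ((tr.getD i' []).set a true) else tr)).set i'
            (((if cb then
                (if ca then tr.set i' ((tr.getD i' []).set a true) else tr).set i'
                  (((if ca then tr.set i' ((tr.getD i' []).set a true) else tr).getD i' []).set b true)
              else (if ca then tr.set i' ((tr.getD i' []).set a true) else tr)).getD i' []).set c true)
        else (if cb then
            (if ca then tr.set i' ((tr.getD i' []).set a true) else tr).set i'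
              (((if ca then tr.set i' ((tr.getD i' []).set a true) else tr).getD i' []).set b true)
          else (if ca then tr.set i' ((tr.getD i' []).set a true) else tr))).getD u []).getD k false)
      = ((tr.getD u []).getD k false
          || (decide (u = i') && (ca && decide (k = a) || cb && decide (k = b) || cc && decide (k = c)))) := by
  have s2 := pvChain2_shape tr Hn Wn i' a b ca cb hsh hi ha hb
  rw [pvCondSet_get _ Hn Wn i' c u k cc s2 hi hc hu hk,
      pvChain2_get tr Hn Wn i' a b u k ca cb hsh hi ha hb hu hk]
  by_cases h1 : u = i' <;> simp [h1, Bool.or_assoc, Bool.and_or_distrib_left]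

lemma pvChain3_shape (tr : List (List Bool)) (Hn Wn i' a b c : Nat) (ca cb cc : Bool)
    (hsh : pvShape tr Hn Wn) (hi : i' < Hn) (ha : a < Wn) (hb : b < Wn) (hc : c < Wn) :
    pvShape (if cc then
          (if cb then
            (if ca then tr.set i' ((tr.getD i' []).set a true) else tr).set i'
              (((if ca then tr.set i' ((tr.getD i' []).set a true) else tr).getD i' []).set b true)
          else (if ca then tr.set i' ((tr.getD i' []).set a true) else tr)).set i'
            (((if cb then
                (if ca then tr.set i' ((tr.getD i' []).set a true) else tr).set i'
                  (((if ca then tr.set i' ((tr.getD i' []).set a true) else tr).getD i' []).set b true)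
              else (if ca then tr.set i' ((tr.getD i' []).set a true) else tr)).getD i' []).set c true)
        else (if cb then
            (if ca then tr.set i' ((tr.getD i' []).set a true) else tr).set i'
              (((if ca then tr.set i' ((tr.getD i' []).set a true) else tr).getD i' []).set b true)
          else (if ca then tr.set i' ((tr.getD i' []).set a true) else tr))) Hn Wn :=
  pvCondSet_shape _ Hn Wn i' c cc (pvChain2_shape tr Hn Wn i' a b ca cb hsh hi ha hb) hi hc

set_option maxHeartbeats 1000000 in
lemma pvABranch_eq (em : List (List Int)) (Hn Wn : Nat) (i j : Nat) (tr : List (List Bool))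
    (hW : 2 ≤ Wn) (hi1 : 1 ≤ i) (hiH : i ≤ Hn - 1) (hH : tr.length = Hn) (hHn : 1 ≤ Hn)
    (hsh : pvShape tr Hn Wn) (hj : j < Wn)
    (hrow : Wn ≤ (em.getD (i-1) []).length) :
    ∀ u k : Nat, u < Hn → k < Wn →
      ((pvABranch em (Wn : Int) (i : Int) tr (j : Int)).getD u []).getD k false
        = ((tr.getD u []).getD k false
            || (decide (u = i-1) && (tr.getD i []).getD j false
                && pvMark (em.getD (i-1) []) Wn j k)) := by
  intro u k hu hk
  have hiH' : i < Hn := by omega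
  have e1 : (i : Int) - 1 = ((i - 1 : Nat) : Int) := by omega
  rw [pvABranch, pvAGetB_natCast tr i j]
  by_cases hb : (tr.getD i []).getD j false = true
  · rw [hb]
    simp only [beq_self_eq_true, if_true, e1]
    by_cases hj0 : j = 0
    · -- j = 0 branch
      subst hj0
      have hcond : (((0 : Nat) : Int) != 0 && ((0 : Nat) : Int) != (Wn : Int) - 1) = false := by simp
      rw [hcond]
      simp only [Bool.false_eq_true, if_false]
      rw [if_pos (by simp)]
      have e3 : ((0 : Nat) : Int) + 1 = ((1 : Nat) : Int) := by omega
      simp only [e3, pvAGet_natCast, pvASet_natCast]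
      rw [pvChain2_get tr Hn Wn (i-1) 0 1 u k _ _ hsh (by omega) (by omega) (by omega) hu hk]
      have hpMS : pvMinSeg (em.getD (i-1) []) (0 - 1) (min Wn (0 + 2)) =
          min ((em.getD (i-1) []).getD 0 0) ((em.getD (i-1) []).getD 1 0) := by
        have hm : min Wn (0 + 2) = 2 := by omega
        rw [hm]
        unfold pvMinSeg
        rw [show (0 - 1 : Nat) = 0 from rfl]
        rw [show (2 - 0 : Nat) = 2 from rfl, pvTake2 (em.getD (i-1) []) 0 (by omega)]
        simp [min_assoc]
      rw [pvMark, hpMS]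
      have hmin : min Wn (0 + 2) = 2 := by omega
      by_cases h1 : k = 0
      · simp [h1, hmin, beq_iff_eq, eq_comm, Bool.beq_comm]
      · by_cases h2 : k = 1
        · simp [h1, h2, hmin, beq_iff_eq, eq_comm, Bool.beq_comm]
        · have hk2 : ¬ (k < 2) := by omega
          simp [h1, h2, hmin, hk2]
    · by_cases hjW : j = Wn - 1
      · -- j = W-1 branch
        have hcond : ((j : Int) != 0 && (j : Int) != (Wn : Int) - 1) = false := by
          have : (j : Int) = (Wn : Int) - 1 := by omega
          simp [this]
        rw [hcond]
        simp only [Bool.false_eq_true, if_false]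
        rw [if_neg (by simp; omega), if_pos (by simp; omega)]
        have e2 : (j : Int) - 1 = ((j - 1 : Nat) : Int) := by omega
        simp only [e2, pvAGet_natCast, pvASet_natCast]
        rw [pvChain2_get tr Hn Wn (i-1) (j-1) j u k _ _ hsh (by omega) (by omega) (by omega) hu hk]
        have hpMS : pvMinSeg (em.getD (i-1) []) (j - 1) (min Wn (j + 2)) =
            min ((em.getD (i-1) []).getD (j-1) 0) ((em.getD (i-1) []).getD j 0) := by
          have hm : min Wn (j + 2) = Wn := by omega
          rw [hm]
          unfold pvMinSeg
          rw [show Wn - (j - 1) = 2 by omega, pvTake2 (em.getD (i-1) []) (j-1) (by omega)]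
          simp [show j - 1 + 1 = j by omega]
        rw [pvMark, hpMS]
        have hmin : min Wn (j + 2) = Wn := by omega
        have f1 : j - 1 ≠ j := by omega
        have f1s : j ≠ j - 1 := by omega
        by_cases h1 : k = j - 1
        · have f3 : j - 1 < Wn := by omega
          simp [h1, hmin, f1, f3, beq_iff_eq, eq_comm, Bool.beq_comm]
        · by_cases h2 : k = j
          · have f4 : j - 1 ≤ j := by omega
            have f5 : j < Wn := by omega
            simp [h1, h2, hmin, f4, f5, f1s, beq_iff_eq, eq_comm, Bool.beq_comm]
          · have hk2 : ¬ (j - 1 ≤ k ∧ k < Wn) := by omega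
            have hk3 : ¬ (j - 1 ≤ k) ∨ ¬ (k < Wn) := by omega
            rcases hk3 with h | h <;> simp [h1, h2, hmin, h]
      · -- interior branch
        have hcond : ((j : Int) != 0 && (j : Int) != (Wn : Int) - 1) = true := by
          rw [Bool.and_eq_true, bne_iff_ne, bne_iff_ne]
          exact ⟨by omega, by omega⟩
        rw [hcond]
        simp only [if_true]
        have e2 : (j : Int) - 1 = ((j - 1 : Nat) : Int) := by omega
        have e3 : (j : Int) + 1 = ((j + 1 : Nat) : Int) := by omega
        simp only [e2, e3, pvAGet_natCast, pvASet_natCast]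
        rw [pvChain3_get tr Hn Wn (i-1) (j-1) j (j+1) u k _ _ _ hsh (by omega) (by omega)
              (by omega) (by omega) hu hk]
        have hpMS : pvMinSeg (em.getD (i-1) []) (j - 1) (min Wn (j + 2)) =
            min ((em.getD (i-1) []).getD (j-1) 0)
              (min ((em.getD (i-1) []).getD j 0) ((em.getD (i-1) []).getD (j+1) 0)) := by
          have hm : min Wn (j + 2) = j + 2 := by omega
          rw [hm]
          unfold pvMinSeg
          rw [show j + 2 - (j - 1) = 3 by omega, pvTake3 (em.getD (i-1) []) (j-1) (by omega)]
          simp [show j - 1 + 1 = j by omega, show j - 1 + 2 = j + 1 by omega, min_assoc]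
        rw [pvMark, hpMS]
        have hmin : min Wn (j + 2) = j + 2 := by omega
        have f1 : j - 1 ≠ j := by omega
        have f1s : j ≠ j - 1 := by omega
        have f2 : j - 1 ≠ j + 1 := by omega
        have f2s : j + 1 ≠ j - 1 := by omega
        have f6 : j ≠ j + 1 := by omega
        have f6s : j + 1 ≠ j := by omega
        by_cases h1 : k = j - 1
        · have f3 : j - 1 < j + 2 := by omega
          simp [h1, hmin, f1, f2, f3, beq_iff_eq, eq_comm, Bool.beq_comm]
        · by_cases h2 : k = j
          · have f4 : j - 1 ≤ j := by omega
            have f5 : j < j + 2 := by omega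
            simp [h1, h2, hmin, f4, f5, f6, f1s, beq_iff_eq, eq_comm, Bool.beq_comm]
          · by_cases h3 : k = j + 1
            · have f7 : j - 1 ≤ j + 1 := by omega
              have f8 : j + 1 < j + 2 := by omega
              simp [h1, h2, h3, hmin, f7, f8, f2s, f6s, beq_iff_eq, eq_comm, Bool.beq_comm]
            · have hk3 : ¬ (j - 1 ≤ k) ∨ ¬ (k < j + 2) := by omega
              rcases hk3 with h | h <;> simp [h1, h2, h3, hmin, h]
  · have hb' : (tr.getD i []).getD j false = false := by simpa using hb
    rw [hb']
    simp

set_option maxHeartbeats 1000000 in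
lemma pvABranch_shape (em : List (List Int)) (Hn Wn : Nat) (i j : Nat) (tr : List (List Bool))
    (hW : 2 ≤ Wn) (hi1 : 1 ≤ i) (hiH : i ≤ Hn - 1) (hHn : 1 ≤ Hn)
    (hsh : pvShape tr Hn Wn) (hj : j < Wn)
    (hrow : Wn ≤ (em.getD (i-1) []).length) :
    pvShape (pvABranch em (Wn : Int) (i : Int) tr (j : Int)) Hn Wn := by
  have hiH' : i < Hn := by omega
  have e1 : (i : Int) - 1 = ((i - 1 : Nat) : Int) := by omega
  rw [pvABranch]
  by_cases hb : (pvAGetB tr (i : Int) (j : Int)) == true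
  · rw [if_pos hb]
    simp only [e1]
    by_cases hj0 : j = 0
    · subst hj0
      have hcond : (((0 : Nat) : Int) != 0 && ((0 : Nat) : Int) != (Wn : Int) - 1) = false := by simp
      rw [hcond]
      simp only [Bool.false_eq_true, if_false]
      rw [if_pos (by simp)]
      have e3 : ((0 : Nat) : Int) + 1 = ((1 : Nat) : Int) := by omega
      simp only [e3, pvASet_natCast]
      exact pvChain2_shape tr Hn Wn (i-1) 0 1 _ _ hsh (by omega) (by omega) (by omega)
    · by_cases hjW : j = Wn - 1
      · have hcond : ((j : Int) != 0 && (j : Int) != (Wn : Int) - 1) = false := by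
          have : (j : Int) = (Wn : Int) - 1 := by omega
          simp [this]
        rw [hcond]
        simp only [Bool.false_eq_true, if_false]
        rw [if_neg (by simp; omega), if_pos (by simp; omega)]
        have e2 : (j : Int) - 1 = ((j - 1 : Nat) : Int) := by omega
        simp only [e2, pvASet_natCast]
        exact pvChain2_shape tr Hn Wn (i-1) (j-1) j _ _ hsh (by omega) (by omega) (by omega)
      · have hcond : ((j : Int) != 0 && (j : Int) != (Wn : Int) - 1) = true := by
          rw [Bool.and_eq_true, bne_iff_ne, bne_iff_ne]
          exact ⟨by omega, by omega⟩
        rw [hcond]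
        simp only [if_true]
        have e2 : (j : Int) - 1 = ((j - 1 : Nat) : Int) := by omega
        have e3 : (j : Int) + 1 = ((j + 1 : Nat) : Int) := by omega
        simp only [e2, e3, pvASet_natCast]
        exact pvChain3_shape tr Hn Wn (i-1) (j-1) j (j+1) _ _ _ hsh (by omega) (by omega)
          (by omega) (by omega)
  · rw [if_neg hb]
    exact hsh

lemma pvAInner_eq (em : List (List Int)) (Hn Wn : Nat) (i : Nat) (tr : List (List Bool))
    (hW : 2 ≤ Wn) (hi1 : 1 ≤ i) (hiH : i ≤ Hn - 1) (hHn : 1 ≤ Hn)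
    (hsh : pvShape tr Hn Wn)
    (hrow : Wn ≤ (em.getD (i-1) []).length) :
    ∀ m : Nat, m ≤ Wn →
      pvShape ((PySem.List.pyRange 0 (m : Int) 1).foldl (pvABranch em (Wn : Int) (i : Int)) tr) Hn Wn ∧
      ∀ u k : Nat, u < Hn → k < Wn →
        (((PySem.List.pyRange 0 (m : Int) 1).foldl (pvABranch em (Wn : Int) (i : Int)) tr).getD u []).getD k false
          = ((tr.getD u []).getD k false
              || (decide (u = i-1) && (List.range m).any (fun j =>
                    (tr.getD i []).getD j false && pvMark (em.getD (i-1) []) Wn j k))) := by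
  intro m
  induction m with
  | zero =>
    intro _
    rw [show ((0 : Nat) : Int) = 0 from rfl, PySem.List.pyRange_one_eq_nil le_rfl]
    exact ⟨hsh, fun u k hu hk => by simp⟩
  | succ m ih =>
    intro hm1
    obtain ⟨ihs, ihv⟩ := ih (by omega)
    have ec : ((m + 1 : Nat) : Int) = (m : Int) + 1 := by push_cast; ring
    rw [ec, PySem.List.pyRange_one_succ_right (by positivity), List.foldl_append]
    simp only [List.foldl_cons, List.foldl_nil]
    have hcast : ((m : Int)) = ((m : Nat) : Int) := rfl
    have hbr := pvABranch_eq em Hn Wn i m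
      ((PySem.List.pyRange 0 (m : Int) 1).foldl (pvABranch em (Wn : Int) (i : Int)) tr)
      hW hi1 hiH ihs.1 hHn ihs (by omega) hrow
    have hbs := pvABranch_shape em Hn Wn i m
      ((PySem.List.pyRange 0 (m : Int) 1).foldl (pvABranch em (Wn : Int) (i : Int)) tr)
      hW hi1 hiH hHn ihs (by omega) hrow
    refine ⟨hbs, fun u k hu hk => ?_⟩
    rw [hbr u k hu hk, ihv u k hu hk]
    have hrowi := ihv i m (by omega) (by omega)
    have hii : decide (i = i - 1) = false := by simp; omega
    rw [hrowi, hii]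
    simp only [Bool.false_and, Bool.and_false, Bool.or_false]
    simp [List.range_succ, Bool.or_assoc, Bool.and_or_distrib_left, Bool.and_assoc]

lemma pvABottom_eq (em : List (List Int)) (Hn Wn : Nat) (a : Int) (tr : List (List Bool))
    (hHn : 1 ≤ Hn) (hsh : pvShape tr Hn Wn) :
    ∀ m : Nat, m ≤ Wn →
      pvShape ((PySem.List.pyRange 0 (m : Int) 1).foldl (pvABottomStep em (Hn : Int) a) tr) Hn Wn ∧
      ∀ u k : Nat, u < Hn → k < Wn →
        (((PySem.List.pyRange 0 (m : Int) 1).foldl (pvABottomStep em (Hn : Int) a) tr).getD u []).getD k false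
          = ((tr.getD u []).getD k false
              || (decide (u = Hn - 1) && decide (k < m) && ((em.getD (Hn-1) []).getD k 0 == a))) := by
  intro m
  have e1 : (Hn : Int) - 1 = ((Hn - 1 : Nat) : Int) := by omega
  induction m with
  | zero =>
    intro _
    rw [show ((0 : Nat) : Int) = 0 from rfl, PySem.List.pyRange_one_eq_nil le_rfl]
    exact ⟨hsh, fun u k hu hk => by simp⟩
  | succ m ih =>
    intro hm1
    obtain ⟨ihs, ihv⟩ := ih (by omega)
    have ec : ((m + 1 : Nat) : Int) = (m : Int) + 1 := by push_cast; ring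
    rw [ec, PySem.List.pyRange_one_succ_right (by positivity), List.foldl_append]
    simp only [List.foldl_cons, List.foldl_nil]
    rw [pvABottomStep, e1, pvAGet_natCast, pvASet_natCast]
    have hug := pvCondSet_get ((PySem.List.pyRange 0 (m : Int) 1).foldl (pvABottomStep em (Hn : Int) a) tr)
      Hn Wn (Hn-1) m
    constructor
    · exact pvCondSet_shape _ Hn Wn (Hn-1) m _ ihs (by omega) (by omega)
    · intro u k hu hk
      rw [hug u k _ ihs (by omega) (by omega) hu hk, ihv u k hu hk]
      by_cases h1 : k = m
      · have h2 : ¬ (k < m) := by omega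
        have h3 : k < m + 1 := by omega
        by_cases h4 : u = Hn - 1 <;> simp [h1, h2, h3, h4]
      · by_cases h2 : k < m
        · have h3 : k < m + 1 := by omega
          simp [h1, h2, h3, Bool.or_assoc]
        · have h3 : ¬ (k < m + 1) := by omega
          simp [h1, h2, h3]

lemma pvAOuter_eq (em : List (List Int)) (Hn Wn : Nat) (a : Int)
    (hHn : 1 ≤ Hn) (hrows : ∀ r ∈ em, Wn ≤ r.length) (hHeq : em.length = Hn) :
    ∀ n : Nat, n ≤ Hn - 1 → (n = 0 ∨ 2 ≤ Wn) → ∀ tr : List (List Bool),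
      pvShape tr Hn Wn →
      (∀ u k : Nat, u < Hn → k < Wn →
        (tr.getD u []).getD k false
          = if n ≤ u then pvSpecRow em Wn a (Hn - 1 - u) k else false) →
      pvShape ((PySem.List.pyRange (n : Int) 0 (-1)).foldl (fun tr i =>
          (PySem.List.pyRange 0 (Wn : Int) 1).foldl (pvABranch em (Wn : Int) i) tr) tr) Hn Wn ∧
      ∀ u k : Nat, u < Hn → k < Wn →
        (((PySem.List.pyRange (n : Int) 0 (-1)).foldl (fun tr i =>
            (PySem.List.pyRange 0 (Wn : Int) 1).foldl (pvABranch em (Wn : Int) i) tr) tr).getD u []).getD k false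
          = pvSpecRow em Wn a (Hn - 1 - u) k := by
  intro n
  induction n with
  | zero =>
    intro _ _ tr hsh hinv
    rw [show ((0 : Nat) : Int) = 0 from rfl, PySem.List.pyRange_neg_one_eq_nil le_rfl]
    simp only [List.foldl_nil]
    refine ⟨hsh, fun u k hu hk => ?_⟩
    rw [hinv u k hu hk, if_pos (Nat.zero_le u)]
  | succ n ih =>
    intro hn1 hor tr hsh hinv
    have hW : 2 ≤ Wn := by rcases hor with h | h <;> omega
    have ec : ((n + 1 : Nat) : Int) = (n : Int) + 1 := by push_cast; ring
    rw [ec, PySem.List.pyRange_neg_one_cons (by omega), List.foldl_cons,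
        show ((n : Int) + 1 - 1) = (n : Int) by ring, ← ec]
    have hmem : em.getD n [] ∈ em := by
      rw [List.getD_eq_getElem?_getD, List.getElem?_eq_getElem (by omega)]
      exact List.getElem_mem _
    have hrow : Wn ≤ (em.getD ((n+1) - 1) []).length := by
      simpa using hrows _ hmem
    have hin := pvAInner_eq em Hn Wn (n+1) tr hW (by omega) hn1 hHn hsh hrow Wn le_rfl
    obtain ⟨Ts, Tv⟩ := hin
    have hinv' : ∀ u k : Nat, u < Hn → k < Wn →
        ((((PySem.List.pyRange 0 (Wn : Int) 1).foldl (pvABranch em (Wn : Int) ((n+1 : Nat) : Int)) tr)).getD u []).getD k false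
          = if n ≤ u then pvSpecRow em Wn a (Hn - 1 - u) k else false := by
      intro u k hu hk
      rw [Tv u k hu hk]
      have hspec : ((List.range Wn).any (fun j =>
            (tr.getD (n+1) []).getD j false && pvMark (em.getD ((n+1)-1) []) Wn j k))
          = pvSpecRow em Wn a (Hn - 1 - n) k := by
        have hd : Hn - 1 - n = (Hn - 1 - (n+1)) + 1 := by omega
        rw [hd]
        have hidx : em.length - 1 - ((Hn - 1 - (n+1)) + 1) = (n+1) - 1 := by omega
        simp only [pvSpecRow, hidx]
        apply PySem.List.any_congr_mem
        intro j hj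
        have hjW : j < Wn := List.mem_range.mp hj
        rw [hinv (n+1) j (by omega) hjW, if_pos le_rfl]
      rw [hspec, hinv u k hu hk]
      by_cases hu' : u = n
      · subst hu'
        rw [if_neg (by omega), if_pos le_rfl]
        simp
      · by_cases h2 : n + 1 ≤ u
        · rw [if_pos h2, if_pos (by omega)]
          simp [hu']
        · rw [if_neg h2, if_neg (by omega)]
          simp [hu']
    exact ih (by omega) (Or.inr hW) _ Ts hinv'

lemma pvAFillRow_eq (T : List (List Bool)) (image : List (List Int)) (Hn Wn : Nat)
    (u : Nat) (hu : u < Hn) (f : List (List Int)) (hsh : pvShape f Hn Wn) :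
    ∀ m : Nat, m ≤ Wn →
      pvShape ((PySem.List.pyRange 0 (m : Int) 1).foldl (fun f v =>
        if pvAGetB T (u : Int) v then pvASet f (u : Int) v 255
        else pvASet f (u : Int) v (pvAGet image (u : Int) v)) f) Hn Wn ∧
      ∀ u' k : Nat, u' < Hn → k < Wn →
        (((PySem.List.pyRange 0 (m : Int) 1).foldl (fun f v =>
            if pvAGetB T (u : Int) v then pvASet f (u : Int) v 255
            else pvASet f (u : Int) v (pvAGet image (u : Int) v)) f).getD u' []).getD k 0
          = if u' = u ∧ k < m then
              (if (T.getD u []).getD k false then 255 else (image.getD u []).getD k 0)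
            else (f.getD u' []).getD k 0 := by
  intro m
  induction m with
  | zero =>
    intro _
    rw [show ((0 : Nat) : Int) = 0 from rfl, PySem.List.pyRange_one_eq_nil le_rfl]
    simp only [List.foldl_nil]
    exact ⟨hsh, fun u' k hu' hk => by simp⟩
  | succ m ih =>
    intro hm1
    obtain ⟨ihs, ihv⟩ := ih (by omega)
    have ec : ((m + 1 : Nat) : Int) = (m : Int) + 1 := by push_cast; ring
    rw [ec, PySem.List.pyRange_one_succ_right (by positivity), List.foldl_append]
    simp only [List.foldl_cons, List.foldl_nil]
    set F := (PySem.List.pyRange 0 (m : Int) 1).foldl (fun f v =>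
        if pvAGetB T (u : Int) v then pvASet f (u : Int) v 255
        else pvASet f (u : Int) v (pvAGet image (u : Int) v)) f with hF
    have hstep : (if pvAGetB T (u : Int) (m : Int) then pvASet F (u : Int) (m : Int) 255
        else pvASet F (u : Int) (m : Int) (pvAGet image (u : Int) (m : Int)))
        = F.set u ((F.getD u []).set m
            (if (T.getD u []).getD m false then 255 else (image.getD u []).getD m 0)) := by
      rw [pvAGetB_natCast, pvAGet_natCast, pvASet_natCast, pvASet_natCast]
      by_cases hc : (T.getD u []).getD m false
      · simp only [hc, if_true]
      · simp only [Bool.not_eq_true] at hc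
        simp only [hc, Bool.false_eq_true, if_false]
    rw [hstep]
    have hlen : u < F.length := by rw [ihs.1]; omega
    have hrl : m < (F.getD u []).length := by rw [ihs.2 u hu]; omega
    constructor
    · exact pvShape_set2 F Hn Wn u m _ ihs hu (by omega)
    · intro u' k hu' hk
      rw [pvGet2_set2 F u m u' k _ 0 hlen hrl, ihv u' k hu' hk]
      by_cases h1 : u' = u <;> by_cases h2 : k = m
      · subst h1; subst h2
        simp [show ¬ (k < k) from by omega, show k < k + 1 from by omega]
      · simp [h1, h2, show (k < m) = (k < m + 1) from by by_cases h : k < m <;> simp [h] <;> omega]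
      · simp [h1, h2]
      · simp [h1, h2]

lemma pvAFill_eq (T : List (List Bool)) (image : List (List Int)) (Hn Wn : Nat)
    (f : List (List Int)) (hsh : pvShape f Hn Wn) :
    ∀ m : Nat, m ≤ Hn →
      pvShape ((PySem.List.pyRange 0 (m : Int) 1).foldl (pvAFillStep T image (Wn : Int)) f) Hn Wn ∧
      ∀ u k : Nat, u < Hn → k < Wn →
        (((PySem.List.pyRange 0 (m : Int) 1).foldl (pvAFillStep T image (Wn : Int)) f).getD u []).getD k 0
          = if u < m then (if (T.getD u []).getD k false then 255 else (image.getD u []).getD k 0)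
            else (f.getD u []).getD k 0 := by
  intro m
  induction m with
  | zero =>
    intro _
    rw [show ((0 : Nat) : Int) = 0 from rfl, PySem.List.pyRange_one_eq_nil le_rfl]
    simp only [List.foldl_nil]
    exact ⟨hsh, fun u k hu hk => by simp⟩
  | succ m ih =>
    intro hm1
    obtain ⟨ihs, ihv⟩ := ih (by omega)
    have ec : ((m + 1 : Nat) : Int) = (m : Int) + 1 := by push_cast; ring
    rw [ec, PySem.List.pyRange_one_succ_right (by positivity), List.foldl_append]
    simp only [List.foldl_cons, List.foldl_nil]
    rw [pvAFillStep]
    obtain ⟨rs, rv⟩ := pvAFillRow_eq T image Hn Wn m (by omega)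
      ((PySem.List.pyRange 0 (m : Int) 1).foldl (pvAFillStep T image (Wn : Int)) f) ihs Wn le_rfl
    refine ⟨rs, fun u k hu hk => ?_⟩
    rw [rv u k hu hk, ihv u k hu hk]
    by_cases h1 : u = m
    · subst h1
      simp [hk, show ¬ (u < u) from by omega, show u < u + 1 from by omega]
    · by_cases h2 : u < m
      · simp [h1, h2, show u < m + 1 from by omega]
      · simp [h1, h2, show ¬ (u < m + 1) from by omega]

lemma pvMatrix_ext (f : List (List Int)) (Hn Wn : Nat) (g : Nat → Nat → Int)
    (hsh : pvShape f Hn Wn)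
    (hval : ∀ u k : Nat, u < Hn → k < Wn → (f.getD u []).getD k 0 = g u k) :
    f = (List.range Hn).map (fun u => (List.range Wn).map (fun v => g u v)) := by
  apply List.ext_getElem
  · simp [hsh.1]
  · intro u h1 h2
    have hu : u < Hn := by simpa [hsh.1] using h1
    have hrowu : f.getD u [] = f[u] := by
      rw [List.getD_eq_getElem?_getD, List.getElem?_eq_getElem h1]
      rfl
    have hlen : f[u].length = Wn := by rw [← hrowu]; exact hsh.2 u hu
    simp only [List.getElem_map, List.getElem_range]
    apply List.ext_getElem
    · simp [hlen]
    · intro k k1 k2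
      have hk : k < Wn := by simpa [hlen] using k1
      have : (f.getD u []).getD k 0 = f[u][k] := by
        rw [hrowu, List.getD_eq_getElem?_getD, List.getElem?_eq_getElem k1]
        rfl
      simp only [List.getElem_map, List.getElem_range]
      rw [← hval u k hu hk, this]

lemma pvConst_shape {α : Type} (x : α) (Hn Wn : Nat) :
    pvShape ((PySem.List.pyRange 0 (Hn : Int) 1).map (fun _ => (PySem.List.pyRange 0 (Wn : Int) 1).map (fun _ => x))) Hn Wn := by
  constructor
  · simp [PySem.List.length_pyRange_one]
  · intro u hu
    rw [List.getD_eq_getElem?_getD, List.getElem?_map,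
        List.getElem?_eq_getElem (l := PySem.List.pyRange 0 (Hn : Int) 1)
          (by simp [PySem.List.length_pyRange_one]; omega)]
    simp [PySem.List.length_pyRange_one]

lemma pvConst_get {α : Type} (x d : α) (Hn Wn u k : Nat) (hu : u < Hn) (hk : k < Wn) :
    (((PySem.List.pyRange 0 (Hn : Int) 1).map (fun _ => (PySem.List.pyRange 0 (Wn : Int) 1).map (fun _ => x))).getD u []).getD k d = x := by
  have hrow : ((PySem.List.pyRange 0 (Hn : Int) 1).map (fun _ => (PySem.List.pyRange 0 (Wn : Int) 1).map (fun _ => x))).getD u []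
      = (PySem.List.pyRange 0 (Wn : Int) 1).map (fun _ => x) := by
    rw [List.getD_eq_getElem?_getD, List.getElem?_map,
        List.getElem?_eq_getElem (l := PySem.List.pyRange 0 (Hn : Int) 1)
          (by simp [PySem.List.length_pyRange_one]; omega)]
    simp
  rw [hrow, List.getD_eq_getElem?_getD, List.getElem?_map,
      List.getElem?_eq_getElem (l := PySem.List.pyRange 0 (Wn : Int) 1)
        (by simp [PySem.List.length_pyRange_one]; omega)]
  simp

lemma pvA_eval (em image : List (List Int)) (Hn Wn : Nat) (a : Int)
    (hHn : 1 ≤ Hn) (hHeq : em.length = Hn) (hor : Hn = 1 ∨ 2 ≤ Wn)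
    (hrows : ∀ r ∈ em, Wn ≤ r.length) :
    (PySem.List.pyRange 0 (Hn : Int) 1).foldl
      (pvAFillStep
        ((PySem.List.pyRange ((Hn : Int) - 1) 0 (-1)).foldl (fun tr i =>
            (PySem.List.pyRange 0 (Wn : Int) 1).foldl (pvABranch em (Wn : Int) i) tr)
          ((PySem.List.pyRange 0 (Wn : Int) 1).foldl (pvABottomStep em (Hn : Int) a)
            ((PySem.List.pyRange 0 (Hn : Int) 1).map (fun _ => (PySem.List.pyRange 0 (Wn : Int) 1).map (fun _ => false)))))
        image (Wn : Int))
      ((PySem.List.pyRange 0 (Hn : Int) 1).map (fun _ => (PySem.List.pyRange 0 (Wn : Int) 1).map (fun _ => (0:Int))))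
    = (List.range Hn).map (fun u => (List.range Wn).map (fun v =>
        if pvSpecRow em Wn a (Hn - 1 - u) v then (255 : Int) else (image.getD u []).getD v 0)) := by
  have e1 : ((Hn : Int) - 1) = ((Hn - 1 : Nat) : Int) := by omega
  rw [e1]
  have sh0 := pvConst_shape false Hn Wn
  obtain ⟨sh1, v1⟩ := pvABottom_eq em Hn Wn a
    ((PySem.List.pyRange 0 (Hn : Int) 1).map (fun _ => (PySem.List.pyRange 0 (Wn : Int) 1).map (fun _ => false)))
    hHn sh0 Wn le_rfl
  have inv1 : ∀ u k : Nat, u < Hn → k < Wn →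
      ((((PySem.List.pyRange 0 (Wn : Int) 1).foldl (pvABottomStep em (Hn : Int) a)
          ((PySem.List.pyRange 0 (Hn : Int) 1).map (fun _ => (PySem.List.pyRange 0 (Wn : Int) 1).map (fun _ => false)))).getD u []).getD k false)
        = if Hn - 1 ≤ u then pvSpecRow em Wn a (Hn - 1 - u) k else false := by
    intro u k hu hk
    rw [v1 u k hu hk, pvConst_get false false Hn Wn u k hu hk]
    by_cases hu' : u = Hn - 1
    · rw [if_pos (by omega)]
      have hd : Hn - 1 - u = 0 := by omega
      rw [hd, pvSpecRow, hHeq, hu']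
      simp [hk]
    · rw [if_neg (by omega)]
      simp [hu', hk]
  obtain ⟨sh2, v2⟩ := pvAOuter_eq em Hn Wn a hHn hrows hHeq (Hn - 1) le_rfl
    (by rcases hor with h | h; exacts [Or.inl (by omega), Or.inr h]) _ sh1 inv1
  have shF := pvConst_shape (0 : Int) Hn Wn
  obtain ⟨sh3, v3⟩ := pvAFill_eq
    ((PySem.List.pyRange ((Hn - 1 : Nat) : Int) 0 (-1)).foldl (fun tr i =>
        (PySem.List.pyRange 0 (Wn : Int) 1).foldl (pvABranch em (Wn : Int) i) tr)
      ((PySem.List.pyRange 0 (Wn : Int) 1).foldl (pvABottomStep em (Hn : Int) a)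
        ((PySem.List.pyRange 0 (Hn : Int) 1).map (fun _ => (PySem.List.pyRange 0 (Wn : Int) 1).map (fun _ => false)))))
    image Hn Wn
    ((PySem.List.pyRange 0 (Hn : Int) 1).map (fun _ => (PySem.List.pyRange 0 (Wn : Int) 1).map (fun _ => (0:Int))))
    shF Hn le_rfl
  apply pvMatrix_ext _ Hn Wn _ sh3
  intro u k hu hk
  rw [v3 u k hu hk, if_pos hu, v2 u k hu hk]

-- ---- B side: the memoized recursion computes pvSpecRow ----

lemma pvMaxCast (j : Nat) : max (0 : Int) ((j : Int) - 1) = ((j - 1 : Nat) : Int) := by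
  rcases Nat.eq_zero_or_pos j with h | h
  · subst h; simp
  · rw [max_eq_right (by omega)]; omega

lemma pvMinCast (Wn j : Nat) : min ((Wn : Int)) ((j : Int) + 2) = ((min Wn (j + 2) : Nat) : Int) := by
  push_cast
  rfl

lemma pvB_slice_min (upper : List Int) (Wn j : Nat) :
    (PySem.List.min? (PySem.List.slice upper (some (max 0 ((j : Int) - 1))) (some (min (Wn : Int) ((j : Int) + 2)))) (fun x => x)).getD 0
      = pvMinSeg upper (j - 1) (min Wn (j + 2)) := by
  rw [pvMaxCast, pvMinCast, PySem.List.slice_natCast]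
  rw [pvMinSeg]
  cases hls : (upper.drop (j-1)).take (min Wn (j + 2) - (j - 1)) with
  | nil => rfl
  | cons y t => rw [PySem.List.min?_id_cons]; rfl

-- memo-dict coherence: every stored entry is the spec value of its cell
def pvInv (em : List (List Int)) (Hn Wn : Nat) (a : Int)
    (memo : PySem.Dict (Int × Int) Bool) : Prop :=
  ∀ p b, memo.get? p = some b →
    ∃ d k : Nat, d ≤ Hn - 1 ∧ k < Wn ∧ p = ((Hn : Int) - 1 - d, (k : Int))
      ∧ b = pvSpecRow em Wn a d k

lemma pvInv_empty (em : List (List Int)) (Hn Wn : Nat) (a : Int) :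
    pvInv em Hn Wn a PySem.Dict.empty := by
  intro p b h
  rw [PySem.Dict.get?_empty] at h
  exact absurd h (by simp)

lemma pvInv_lookup (em : List (List Int)) (Hn Wn : Nat) (a : Int)
    (memo : PySem.Dict (Int × Int) Bool) (h : pvInv em Hn Wn a memo)
    (d k : Nat) (hd : d ≤ Hn - 1) (hk : k < Wn) (b : Bool)
    (hget : memo.get? ((Hn : Int) - 1 - d, (k : Int)) = some b) :
    b = pvSpecRow em Wn a d k := by
  obtain ⟨d', k', hd', hk', hp, hb⟩ := h _ _ hget
  have h1 : (Hn : Int) - 1 - d' = (Hn : Int) - 1 - d ∧ ((k' : Nat) : Int) = ((k : Nat) : Int) := by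
    constructor <;> [exact congrArg Prod.fst hp.symm; exact congrArg Prod.snd hp.symm]
  have : d' = d ∧ k' = k := by omega
  rw [hb, this.1, this.2]

lemma pvInv_insert (em : List (List Int)) (Hn Wn : Nat) (a : Int)
    (memo : PySem.Dict (Int × Int) Bool) (h : pvInv em Hn Wn a memo)
    (d k : Nat) (hd : d ≤ Hn - 1) (hk : k < Wn) :
    pvInv em Hn Wn a (memo.insert ((Hn : Int) - 1 - d, (k : Int)) (pvSpecRow em Wn a d k)) := by
  intro p b hget
  rw [PySem.Dict.get?_insert] at hget
  by_cases hp : p = ((Hn : Int) - 1 - d, (k : Int))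
  · rw [if_pos hp] at hget
    exact ⟨d, k, hd, hk, hp, by injection hget with h'; exact h'.symm⟩
  · rw [if_neg hp] at hget
    exact h _ _ hget

lemma pvBMarked_correct (em : List (List Int)) (Hn Wn : Nat) (a : Int)
    (hHn : 1 ≤ Hn) (hHeq : em.length = Hn) :
    ∀ d : Nat, d ≤ Hn - 1 → ∀ k : Nat, k < Wn → ∀ memo, pvInv em Hn Wn a memo →
      (pvBMarked em (Hn : Int) (Wn : Int) a d (k : Int) memo).1 = pvSpecRow em Wn a d k
      ∧ pvInv em Hn Wn a (pvBMarked em (Hn : Int) (Wn : Int) a d (k : Int) memo).2 := by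
  intro d
  induction d with
  | zero =>
    intro _ k hk memo hinv
    have hkey : ((Hn : Int) - 1, (k : Int)) = ((Hn : Int) - 1 - ((0 : Nat) : Int), (k : Int)) := by
      norm_num
    simp only [pvBMarked]
    cases hget : memo.get? ((Hn : Int) - 1, (k : Int)) with
    | some b =>
      have hb := pvInv_lookup em Hn Wn a memo hinv 0 k (by omega) hk b (by rw [← hkey]; exact hget)
      simp only [hget]
      exact ⟨hb, hinv⟩
    | none =>
      simp only [hget]
      have hr : (PySem.List.pyGetD (PySem.List.pyGetD em ((Hn : Int) - 1) []) (k : Int) 0 == a)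
          = pvSpecRow em Wn a 0 k := by
        rw [show ((Hn : Int) - 1) = ((Hn - 1 : Nat) : Int) by omega, PySem.List.pyGetD_natCast,
            PySem.List.pyGetD_natCast, pvSpecRow, hHeq]
      refine ⟨hr, ?_⟩
      rw [hkey, hr]
      exact pvInv_insert em Hn Wn a memo hinv 0 k (by omega) hk
  | succ d ih =>
    intro hd1 k hk memo hinv
    have hkey : ((Hn : Int) - 1 - ((d : Int) + 1), (k : Int))
        = ((Hn : Int) - 1 - ((d + 1 : Nat) : Int), (k : Int)) := by
      push_cast; ring_nf
    simp only [pvBMarked]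
    cases hget : memo.get? ((Hn : Int) - 1 - ((d : Int) + 1), (k : Int)) with
    | some b =>
      have hb := pvInv_lookup em Hn Wn a memo hinv (d+1) k hd1 hk b (by rw [← hkey]; exact hget)
      simp only [hget]
      exact ⟨hb, hinv⟩
    | none =>
      simp only [hget]
      have hrowR : PySem.List.pyGetD em ((Hn : Int) - 1 - ((d : Int) + 1)) []
          = em.getD (Hn - 1 - (d+1)) [] := by
        rw [show ((Hn : Int) - 1 - ((d : Int) + 1)) = ((Hn - 1 - (d+1) : Nat) : Int) by omega,
            PySem.List.pyGetD_natCast]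
      set R : List Int := em.getD (Hn - 1 - (d+1)) [] with hR
      set FN : Nat → Bool := fun j =>
        pvSpecRow em Wn a d j
          && (PySem.List.pyGetD R ((k : Nat) : Int) 0 == pvMinSeg R (j - 1) (min Wn (j + 2))) with hFNdef
      -- the inner loop over any prefix of columns, stated for an arbitrary list of Nat columns
      have loop : ∀ (js : List Int), (∀ j ∈ js, ∃ jN : Nat, j = (jN : Int) ∧ jN < Wn) →
          ∀ (memo : PySem.Dict (Int × Int) Bool) (r0 : Bool), pvInv em Hn Wn a memo →
          pvInv em Hn Wn a ((js.foldl (fun st j =>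
              pvBUpd R (Wn : Int) (k : Int) (pvBMarked em (Hn : Int) (Wn : Int) a d j st.1) st.2 j)
              (memo, r0)).1)
          ∧ (js.foldl (fun st j =>
              pvBUpd R (Wn : Int) (k : Int) (pvBMarked em (Hn : Int) (Wn : Int) a d j st.1) st.2 j)
              (memo, r0)).2 = (r0 || js.any (fun j => FN j.toNat)) := by
        intro js
        induction js with
        | nil => intro _ memo r0 hinv'; exact ⟨hinv', by simp⟩
        | cons j0 t iht =>
          intro hmem memo r0 hinv'
          obtain ⟨jN, rfl, hjW⟩ := hmem j0 (List.mem_cons_self)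
          simp only [List.foldl_cons]
          obtain ⟨hv, hI⟩ := ih (by omega) jN hjW memo hinv'
          have hstep : pvBUpd R (Wn : Int) (k : Int)
              (pvBMarked em (Hn : Int) (Wn : Int) a d (jN : Int) memo) r0 (jN : Int)
              = ((pvBMarked em (Hn : Int) (Wn : Int) a d (jN : Int) memo).2, r0 || FN jN) := by
            rw [pvBUpd, pvB_slice_min, hv]
            have hFNj : FN jN = (pvSpecRow em Wn a d jN
                && (PySem.List.pyGetD R ((k : Nat) : Int) 0 == pvMinSeg R (jN - 1) (min Wn (jN + 2)))) := rfl
            rw [hFNj]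
            cases hb : pvSpecRow em Wn a d jN
                && (PySem.List.pyGetD R ((k : Nat) : Int) 0 == pvMinSeg R (jN - 1) (min Wn (jN + 2))) <;>
              simp
          rw [hstep]
          obtain ⟨hI', hval⟩ := iht (fun j hj => hmem j (List.mem_cons_of_mem _ hj)) _ _ hI
          refine ⟨hI', ?_⟩
          rw [hval, List.any_cons]
          simp [Bool.or_assoc]
      -- the column list the port iterates over
      have hlo := pvMaxCast k
      have hhi := pvMinCast Wn k
      have hrange : PySem.List.pyRange (max 0 ((k : Int) - 1)) (min (Wn : Int) ((k : Int) + 2)) 1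
          = (List.range (min Wn (k + 2) - (k - 1))).map (fun t : Nat => ((k - 1 : Nat) : Int) + (t : Int)) := by
        have hn : ((((min Wn (k + 2) : Nat) : Int)) - (((k - 1 : Nat) : Int))).toNat
            = min Wn (k + 2) - (k - 1) := by omega
        rw [hlo, hhi, PySem.List.pyRange_one, hn]
      have hmem : ∀ j ∈ (List.range (min Wn (k + 2) - (k - 1))).map (fun t : Nat => ((k - 1 : Nat) : Int) + (t : Int)),
          ∃ jN : Nat, j = (jN : Int) ∧ jN < Wn := by
        intro j hj
        rw [List.mem_map] at hj
        obtain ⟨tt, htt, rfl⟩ := hj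
        rw [List.mem_range] at htt
        exact ⟨k - 1 + tt, by omega, by omega⟩
      simp only [hrowR, hrange]
      obtain ⟨hI, hval⟩ := loop _ hmem memo false hinv
      have hbridge : ∀ j : Nat, k - 1 ≤ j → j < min Wn (k + 2) →
          (pvSpecRow em Wn a d j && pvMark R Wn j k) = FN j := by
        intro j h1 h2
        rw [hFNdef, pvMark]
        have e1 : decide (j - 1 ≤ k) = true := by simp; omega
        have e2 : decide (k < min Wn (j + 2)) = true := by simp; omega
        rw [e1, e2]
        simp [PySem.List.pyGetD_natCast, List.getD_eq_getElem?_getD]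
      have hspec : pvSpecRow em Wn a (d+1) k
          = (List.range Wn).any (fun j => pvSpecRow em Wn a d j && pvMark R Wn j k) := by
        simp only [pvSpecRow, hHeq, ← hR]
      have hany : ((List.range (min Wn (k + 2) - (k - 1))).map
            (fun t : Nat => ((k - 1 : Nat) : Int) + (t : Int))).any (fun j => FN j.toNat)
          = pvSpecRow em Wn a (d+1) k := by
        rw [hspec, Bool.eq_iff_iff]
        simp only [List.any_eq_true]
        constructor
        · rintro ⟨j, hjmem, hFj⟩
          rw [List.mem_map] at hjmem
          obtain ⟨tt, htt, rfl⟩ := hjmem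
          rw [List.mem_range] at htt
          have hjt : ((((k - 1 : Nat) : Int)) + (tt : Int)).toNat = k - 1 + tt := by omega
          rw [hjt] at hFj
          refine ⟨k - 1 + tt, List.mem_range.mpr (by omega), ?_⟩
          show (pvSpecRow em Wn a d (k - 1 + tt) && pvMark R Wn (k - 1 + tt) k) = true
          rw [hbridge (k - 1 + tt) (by omega) (by omega)]
          exact hFj
        · rintro ⟨j, hjmem, hFj⟩
          rw [List.mem_range] at hjmem
          have hw : k - 1 ≤ j ∧ j < min Wn (k + 2) := by
            rw [Bool.and_eq_true, pvMark, Bool.and_eq_true, Bool.and_eq_true] at hFj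
            obtain ⟨_, ⟨hc1, hc2⟩, _⟩ := hFj
            have hb1 := of_decide_eq_true hc1
            have hb2 := of_decide_eq_true hc2
            omega
          refine ⟨(((k - 1 : Nat) : Int)) + ((j - (k - 1) : Nat) : Int),
            List.mem_map.mpr ⟨j - (k - 1), List.mem_range.mpr (by omega), rfl⟩, ?_⟩
          have hjt : ((((k - 1 : Nat) : Int)) + ((j - (k - 1) : Nat) : Int)).toNat = j := by omega
          rw [hjt, ← hbridge j hw.1 hw.2]
          exact hFj
      refine ⟨?_, ?_⟩
      · simp only [hval, Bool.false_or, hany]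
      · simp only [hval, Bool.false_or, hany]
        rw [hkey]
        exact pvInv_insert em Hn Wn a _ hI (d+1) k hd1 hk

lemma pvBFillRow_eq (em image : List (List Int)) (Hn Wn : Nat) (a : Int)
    (hHn : 1 ≤ Hn) (hHeq : em.length = Hn) (u : Nat) (hu : u < Hn) :
    ∀ m : Nat, m ≤ Wn → ∀ (memo : PySem.Dict (Int × Int) Bool) (acc : List Int),
      pvInv em Hn Wn a memo →
      pvInv em Hn Wn a (((PySem.List.pyRange 0 (m : Int) 1).foldl
          (pvBFillRowStep em image (Hn : Int) (Wn : Int) a (u : Int)) (acc, memo)).2)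
      ∧ ((PySem.List.pyRange 0 (m : Int) 1).foldl
          (pvBFillRowStep em image (Hn : Int) (Wn : Int) a (u : Int)) (acc, memo)).1
        = acc ++ (List.range m).map (fun v =>
            if pvSpecRow em Wn a (Hn - 1 - u) v then (255 : Int) else (image.getD u []).getD v 0) := by
  intro m
  induction m with
  | zero =>
    intro _ memo acc hinv
    rw [show ((0 : Nat) : Int) = 0 from rfl, PySem.List.pyRange_one_eq_nil le_rfl]
    simp only [List.foldl_nil]
    exact ⟨hinv, by simp⟩
  | succ m ihm =>
    intro hm memo acc hinv
    obtain ⟨hI, hv⟩ := ihm (by omega) memo acc hinv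
    have ec : ((m + 1 : Nat) : Int) = (m : Int) + 1 := by push_cast; ring
    rw [ec, PySem.List.pyRange_one_succ_right (by positivity), List.foldl_append]
    simp only [List.foldl_cons, List.foldl_nil]
    simp only [pvBFillRowStep]
    have ht : (((Hn : Int)) - 1 - ((u : Nat) : Int)).toNat = Hn - 1 - u := by omega
    simp only [ht]
    obtain ⟨hbv, hbI⟩ := pvBMarked_correct em Hn Wn a hHn hHeq (Hn - 1 - u) (by omega) m
      (by omega) _ hI
    refine ⟨hbI, ?_⟩
    rw [hv, hbv]
    simp [List.range_succ, PySem.List.pyGetD_natCast, List.getD_eq_getElem?_getD]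

lemma pvBFill_eq (em image : List (List Int)) (Hn Wn : Nat) (a : Int)
    (hHn : 1 ≤ Hn) (hHeq : em.length = Hn) :
    ∀ m : Nat, m ≤ Hn → ∀ (memo : PySem.Dict (Int × Int) Bool) (acc : List (List Int)),
      pvInv em Hn Wn a memo →
      pvInv em Hn Wn a (((PySem.List.pyRange 0 (m : Int) 1).foldl
          (pvBFillStep em image (Hn : Int) (Wn : Int) a) (acc, memo)).2)
      ∧ ((PySem.List.pyRange 0 (m : Int) 1).foldl
          (pvBFillStep em image (Hn : Int) (Wn : Int) a) (acc, memo)).1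
        = acc ++ (List.range m).map (fun u => (List.range Wn).map (fun v =>
            if pvSpecRow em Wn a (Hn - 1 - u) v then (255 : Int) else (image.getD u []).getD v 0)) := by
  intro m
  induction m with
  | zero =>
    intro _ memo acc hinv
    rw [show ((0 : Nat) : Int) = 0 from rfl, PySem.List.pyRange_one_eq_nil le_rfl]
    simp only [List.foldl_nil]
    exact ⟨hinv, by simp⟩
  | succ m ihm =>
    intro hm memo acc hinv
    obtain ⟨hI, hv⟩ := ihm (by omega) memo acc hinv
    have ec : ((m + 1 : Nat) : Int) = (m : Int) + 1 := by push_cast; ring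
    rw [ec, PySem.List.pyRange_one_succ_right (by positivity), List.foldl_append]
    simp only [List.foldl_cons, List.foldl_nil]
    simp only [pvBFillStep]
    obtain ⟨hrI, hrv⟩ := pvBFillRow_eq em image Hn Wn a hHn hHeq m (by omega) Wn le_rfl _ [] hI
    refine ⟨hrI, ?_⟩
    rw [hv, hrv]
    simp [List.range_succ]

-- ===== VERDICT (by name: the statement is the Claim_ definition above) =====
theorem tracingpath_spec : Claim_equal_tracingpath := by
  intro em image _ hpre
  unfold Spec_tracingpath
  obtain ⟨hne, hW1, hHW, hrows, _, _⟩ := hpre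
  have hget0 : PySem.List.pyGetD em (0 : Int) [] = em.headI := by
    cases em with
    | nil => exact absurd rfl hne
    | cons r t => simp [PySem.List.pyGetD_zero_cons]
  have hHn1 : 1 ≤ em.length := by
    cases em with
    | nil => exact absurd rfl hne
    | cons r t => simp
  simp only [tracingpath, tracingpath_alt]
  rw [hget0]
  rw [pvA_eval em image em.length em.headI.length
        ((PySem.List.min? (PySem.List.pyGetD em ((em.length : Int) - 1) []) (fun x => x)).getD 0)
        hHn1 rfl hHW hrows]
  have hB := pvBFill_eq em image em.length em.headI.length
        ((PySem.List.min? (PySem.List.pyGetD em ((em.length : Int) - 1) []) (fun x => x)).getD 0)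
        hHn1 rfl em.length le_rfl PySem.Dict.empty []
        (pvInv_empty em em.length em.headI.length _)
  rw [hB.2]
  simp
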